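-- pv_equiv track=rewrite | github.com/hranjbar/LinkedInLearning | Advanced_Core_Python_Code_Challenges/pairwise_offset.py | pairwise_offset
-- ===== SOURCE A (Python) =====
-- def pairwise_offset(sequence, fillvalue="*", offset=0):
--     ret = []
--     j = 0
--     for i in range(0, offset):
--         if j < len(sequence):
--             x = sequence[j], fillvalue
--         else:
--             x = fillvalue, fillvalue
--         ret.append(x)
--         j += 1
--
--     for i in range(0, len(sequence)):
--         if j < len(sequence):
--             x = sequence[j], sequence[i]
--         else:
--             x = fillvalue, sequence[i]
--         ret.append(x)
--         j += 1
--
--     return ret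
-- ===== SOURCE B (Python) =====
-- def pairwise_offset(sequence, fillvalue="*", offset=0):
--     # pad-and-zip: zip the padded sequence with an offset-delayed copy of itself
--     pad = [fillvalue] * offset          # empty when offset <= 0, matching range(0, offset)
--     seq = list(sequence)
--     return list(zip(seq + pad, pad + seq))
-- ===== Notes on version B (the rewrite author's own statement) =====
-- stated objective: idiomatic
-- what changed: Replaces the two index-tracking append loops with a closed pad-and-zip construction: zip the right-padded sequence against a fillvalue-delayed copy of itself.
import Mathlib
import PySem

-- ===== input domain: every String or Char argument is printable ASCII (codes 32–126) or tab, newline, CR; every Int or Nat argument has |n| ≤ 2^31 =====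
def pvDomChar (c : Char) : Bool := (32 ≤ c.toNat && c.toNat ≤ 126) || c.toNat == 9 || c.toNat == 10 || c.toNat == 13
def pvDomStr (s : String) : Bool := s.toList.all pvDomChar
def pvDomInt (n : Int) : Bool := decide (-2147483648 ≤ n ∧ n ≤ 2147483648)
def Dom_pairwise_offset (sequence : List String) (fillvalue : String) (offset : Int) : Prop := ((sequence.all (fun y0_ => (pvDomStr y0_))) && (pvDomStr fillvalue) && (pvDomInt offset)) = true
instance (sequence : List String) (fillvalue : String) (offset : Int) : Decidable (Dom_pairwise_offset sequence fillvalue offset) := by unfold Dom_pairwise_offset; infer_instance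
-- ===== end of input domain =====

-- B replaces A's two index-tracking append loops by a closed pad-and-zip construction (idiomatic; same cost).

-- ===== PORT A =====
-- state of both loops: (ret, j); loop 1 over range(0, offset), loop 2 over range(0, len(sequence))
def pairwise_offset (sequence : List String) (fillvalue : String) (offset : Int) : List (String × String) :=
  ((PySem.List.pyRange 0 (sequence.length : Int) 1).foldl
    (fun (st : List (String × String) × Int) i =>
      (st.1 ++ [if st.2 < (sequence.length : Int)
                then (PySem.List.pyGetD sequence st.2 fillvalue, PySem.List.pyGetD sequence i fillvalue)
                else (fillvalue, PySem.List.pyGetD sequence i fillvalue)], st.2 + 1))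
    ((PySem.List.pyRange 0 offset 1).foldl
      (fun (st : List (String × String) × Int) _i =>
        (st.1 ++ [if st.2 < (sequence.length : Int)
                  then (PySem.List.pyGetD sequence st.2 fillvalue, fillvalue)
                  else (fillvalue, fillvalue)], st.2 + 1))
      ([], 0))).1

-- ===== PORT B =====
def pairwise_offset_alt (sequence : List String) (fillvalue : String) (offset : Int) : List (String × String) :=
  let pad := List.replicate offset.toNat fillvalue
  (sequence ++ pad).zip (pad ++ sequence)

-- ===== PRECONDITION & SPEC =====
def Spec_pairwise_offset (sequence : List String) (fillvalue : String) (offset : Int) (out : List (String × String)) : Prop := out = pairwise_offset_alt sequence fillvalue offset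
instance (sequence : List String) (fillvalue : String) (offset : Int) (out : List (String × String)) : Decidable (Spec_pairwise_offset sequence fillvalue offset out) := by unfold Spec_pairwise_offset; infer_instance

-- ===== CLAIM (what is proved, stated in full; the proofs are below) =====
def Claim_equal_pairwise_offset : Prop := ∀ (sequence : List String) (fillvalue : String) (offset : Int), Dom_pairwise_offset sequence fillvalue offset → Spec_pairwise_offset sequence fillvalue offset (pairwise_offset sequence fillvalue offset)

-- ===== LEMMAS AND PROOFS =====

-- A's first loop: each step appends one pair determined by the running index j and bumps j.
lemma pv_loop1_eval (s : List String) (f : String) :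
    ∀ (m : Nat) (acc : List (String × String)) (j0 : Int),
      ((List.range m).map (fun (k : Nat) => ((0 : Int) + (k : Int)))).foldl
        (fun (st : List (String × String) × Int) _i =>
          (st.1 ++ [if st.2 < (s.length : Int)
                    then (PySem.List.pyGetD s st.2 f, f)
                    else (f, f)], st.2 + 1)) (acc, j0)
      = (acc ++ (List.range m).map
            (fun (k : Nat) => if j0 + (k : Int) < (s.length : Int)
                              then (PySem.List.pyGetD s (j0 + (k : Int)) f, f) else (f, f)),
         j0 + m) := by
  intro m
  induction m with
  | zero => intro acc j0; simp
  | succ m ih =>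
      intro acc j0
      rw [List.range_succ, List.map_append, List.foldl_append, ih]
      simp [List.append_assoc, Nat.cast_add, Nat.cast_one, add_assoc]

-- A's second loop: appends (sequence[j] or fill, sequence[i]) while bumping j.
lemma pv_loop2_eval (s : List String) (f : String) :
    ∀ (m : Nat) (acc : List (String × String)) (j0 : Int),
      ((List.range m).map (fun (k : Nat) => ((0 : Int) + (k : Int)))).foldl
        (fun (st : List (String × String) × Int) i =>
          (st.1 ++ [if st.2 < (s.length : Int)
                    then (PySem.List.pyGetD s st.2 f, PySem.List.pyGetD s i f)
                    else (f, PySem.List.pyGetD s i f)], st.2 + 1)) (acc, j0)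
      = (acc ++ (List.range m).map
            (fun (k : Nat) => if j0 + (k : Int) < (s.length : Int)
                      then (PySem.List.pyGetD s (j0 + (k : Int)) f, PySem.List.pyGetD s ((0 : Int) + (k : Int)) f)
                      else (f, PySem.List.pyGetD s ((0 : Int) + (k : Int)) f)),
         j0 + m) := by
  intro m
  induction m with
  | zero => intro acc j0; simp
  | succ m ih =>
      intro acc j0
      rw [List.range_succ, List.map_append, List.foldl_append, ih]
      simp [List.append_assoc, Nat.cast_add, Nat.cast_one, add_assoc]

-- The two loop outputs concatenated are exactly the pad-and-zip list, position by position.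
lemma pv_concat_eq_zip (s : List String) (f : String) (F : Nat) :
    (List.range F).map (fun (k : Nat) => if (0 : Int) + (k : Int) < (s.length : Int)
                                 then (PySem.List.pyGetD s ((0 : Int) + (k : Int)) f, f) else (f, f))
    ++ (List.range s.length).map
         (fun (k : Nat) => if ((0 : Int) + (F : Int)) + (k : Int) < (s.length : Int)
                   then (PySem.List.pyGetD s (((0 : Int) + (F : Int)) + (k : Int)) f, PySem.List.pyGetD s ((0 : Int) + (k : Int)) f)
                   else (f, PySem.List.pyGetD s ((0 : Int) + (k : Int)) f))
    = (s ++ List.replicate F f).zip (List.replicate F f ++ s) := by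
  apply List.ext_getElem
  · simp [Nat.add_comm]
  · intro t h1 h2
    rw [List.getElem_zip]
    simp only [List.getElem_append, List.getElem_map, List.getElem_range, List.getElem_replicate,
      List.length_map, List.length_range, List.length_replicate, zero_add]
    have hlen : t < F + s.length := by
      simpa using h1
    split_ifs with h1 h2 h3 h4 h5 h6 h7
    · have e : PySem.List.pyGetD s ((t : Nat) : Int) f = s[t] := by
        rw [PySem.List.pyGetD_natCast]; exact List.getD_eq_getElem s f h3
      simp [e]
    · exfalso; omega
    · exfalso; omega
    · rfl
    · have hc : ((F : Int) + ((t - F : Nat) : Int)) = ((t : Nat) : Int) := by omega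
      have e1 : PySem.List.pyGetD s ((F : Int) + ((t - F : Nat) : Int)) f = s[t] := by
        rw [hc, PySem.List.pyGetD_natCast]; exact List.getD_eq_getElem s f h6
      have e2 : PySem.List.pyGetD s (((t - F : Nat)) : Int) f = s[t - F] := by
        rw [PySem.List.pyGetD_natCast]; exact List.getD_eq_getElem s f (by omega)
      simp [e1, e2]
    · exfalso; omega
    · exfalso; omega
    · have e2 : PySem.List.pyGetD s (((t - F : Nat)) : Int) f = s[t - F] := by
        rw [PySem.List.pyGetD_natCast]; exact List.getD_eq_getElem s f (by omega)
      simp [e2]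

lemma pv_main (sequence : List String) (fillvalue : String) (offset : Int) :
    pairwise_offset sequence fillvalue offset = pairwise_offset_alt sequence fillvalue offset := by
  unfold pairwise_offset pairwise_offset_alt
  rw [PySem.List.pyRange_one 0 offset, PySem.List.pyRange_one 0 (sequence.length : Int)]
  simp only [sub_zero, Int.toNat_natCast]
  rw [pv_loop1_eval, pv_loop2_eval]
  simpa using pv_concat_eq_zip sequence fillvalue offset.toNat

-- ===== VERDICT (by name: the statement is the Claim_ definition above) =====
theorem pairwise_offset_spec : Claim_equal_pairwise_offset := by
  intro sequence fillvalue offset _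
  unfold Spec_pairwise_offset
  exact pv_main sequence fillvalue offset
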